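-- pv_equiv track=rewrite | github.com/MasumRab/EmailIntelligence | scripts/dedup_parent_tasks.py | find_next_steps_end
-- ===== SOURCE A (Python) =====
-- def find_next_steps_end(lines):
--     """Find where the ## Next Steps section ends (before any trailing junk)."""
--     in_next_steps = False
--     next_steps_start = -1
--     next_steps_end = -1
--
--     for i, line in enumerate(lines):
--         stripped = line.strip()
--         if stripped == "## Next Steps":
--             in_next_steps = True
--             next_steps_start = i
--             continue
--         if in_next_steps and stripped.startswith("## "):
--             # Found the next section after Next Steps
--             next_steps_end = i
--             break
--
--     if in_next_steps and next_steps_end == -1: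
--         # Next Steps is the last section - find the content end
--         # Walk backwards from end to find last non-blank, non-hr line
--         for i in range(len(lines) - 1, next_steps_start, -1):
--             stripped = lines[i].strip()
--             if stripped and stripped != "---":
--                 next_steps_end = i + 1
--                 break
--
--     return next_steps_start, next_steps_end
-- ===== SOURCE B (Python) =====
-- def find_next_steps_end(lines):
--     """Find where the ## Next Steps section ends (before any trailing junk)."""
--     stripped = [l.strip() for l in lines]
--     ns = [i for i, s in enumerate(stripped) if s == "## Next Steps"]
--     if not ns:
--         return -1, -1
--     others = [i for i, s in enumerate(stripped)
--               if i > ns[0] and s.startswith("## ") and s != "## Next Steps"]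
--     if others:
--         end = others[0]
--         start = max(i for i in ns if i < end)
--         return start, end
--     start = ns[-1]
--     end = next((i + 1 for i in range(len(lines) - 1, start, -1)
--                 if stripped[i] and stripped[i] != "---"), -1)
--     return start, end
-- ===== Notes on version B (the rewrite author's own statement) =====
-- stated objective: alternative
-- what changed: A's single stateful flag-loop with break is replaced by building the index lists of '## Next Steps' lines and of later other '## ' headers in comprehension passes over the enumerated stripped lines, then selecting start/end from those lists (max below the first other header, or the last occurrence plus a backward next()-scan).
import Mathlib
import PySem

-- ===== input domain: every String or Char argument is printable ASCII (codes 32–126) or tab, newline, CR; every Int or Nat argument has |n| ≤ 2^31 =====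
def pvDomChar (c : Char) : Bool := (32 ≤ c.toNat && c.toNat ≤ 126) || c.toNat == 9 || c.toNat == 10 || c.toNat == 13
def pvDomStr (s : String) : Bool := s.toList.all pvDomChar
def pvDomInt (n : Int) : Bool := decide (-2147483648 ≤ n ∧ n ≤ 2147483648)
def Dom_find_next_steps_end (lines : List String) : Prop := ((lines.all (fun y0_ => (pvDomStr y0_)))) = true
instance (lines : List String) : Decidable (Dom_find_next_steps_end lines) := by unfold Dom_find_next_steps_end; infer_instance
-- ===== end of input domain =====

-- B replaces A's stateful flag-loop with break by index lists built in one comprehension pass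
-- (header positions first, then selection); same return value, objective: alternative decomposition.

-- ===== PORT A =====
-- the forward for-loop of A: state (in_next_steps, next_steps_start, next_steps_end), break = early return
def pvLoopA : List String → Int → Bool → Int → Int → Bool × Int × Int
  | [], _, ins, st, en => (ins, st, en)
  | line :: rest, i, ins, st, en =>
    let stripped := PySem.Str.strip line
    if stripped = "## Next Steps" then pvLoopA rest (i + 1) true i en
    else if ins && PySem.Str.startswith stripped "## " then (ins, st, i)
    else pvLoopA rest (i + 1) ins st en

-- A's backward for-loop over range(len(lines)-1, next_steps_start, -1), break = early return
def pvBackA (lines : List String) : List Int → Int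
  | [] => -1
  | i :: rest =>
    let stripped := PySem.Str.strip (PySem.List.pyGetD lines i "")
    if stripped ≠ "" ∧ stripped ≠ "---" then i + 1 else pvBackA lines rest

def find_next_steps_end (lines : List String) : Int × Int :=
  let r := pvLoopA lines 0 false (-1) (-1)
  let ins := r.1
  let st := r.2.1
  let en := r.2.2
  if ins = true ∧ en = -1 then
    (st, pvBackA lines (PySem.List.pyRange (PySem.List.len lines - 1) st (-1)))
  else (st, en)

-- ===== PORT B =====
def find_next_steps_end_alt (lines : List String) : Int × Int :=
  let ss := lines.map PySem.Str.strip
  let ns := (PySem.List.enumerate ss 0).filterMap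
      (fun p => if p.2 = "## Next Steps" then some p.1 else none)
  match ns with
  | [] => (-1, -1)
  | f :: _ =>
    let others := (PySem.List.enumerate ss 0).filterMap
        (fun p => if f < p.1 ∧ PySem.Str.startswith p.2 "## " = true ∧ p.2 ≠ "## Next Steps"
                  then some p.1 else none)
    match others with
    | e :: _ =>
      let start := (PySem.List.max? (ns.filter (fun i => i < e)) (fun i => i)).getD (-1)
      (start, e)
    | [] =>
      let start := PySem.List.pyGetD ns (-1) (-1)
      let en := ((PySem.List.pyRange (PySem.List.len lines - 1) start (-1)).find?
          (fun i => decide (PySem.List.pyGetD ss i "" ≠ "" ∧ PySem.List.pyGetD ss i "" ≠ "---"))).elim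
          (-1) (fun i => i + 1)
      (start, en)

-- ===== PRECONDITION & SPEC =====
def Spec_find_next_steps_end (lines : List String) (out : Int × Int) : Prop := out = find_next_steps_end_alt lines
instance (lines : List String) (out : Int × Int) : Decidable (Spec_find_next_steps_end lines out) := by unfold Spec_find_next_steps_end; infer_instance

-- ===== CLAIM (what is proved, stated in full; the proofs are below) =====
def Claim_equal_find_next_steps_end : Prop := ∀ (lines : List String), Dom_find_next_steps_end lines → Spec_find_next_steps_end lines (find_next_steps_end lines)

-- ===== LEMMAS AND PROOFS =====

-- indices (in enumerate order) of "## Next Steps" lines, resp. of other "## " headers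
def pvNS (ss : List String) (k : Int) : List Int :=
  (PySem.List.enumerate ss k).filterMap (fun p => if p.2 = "## Next Steps" then some p.1 else none)

def pvOT (ss : List String) (k : Int) : List Int :=
  (PySem.List.enumerate ss k).filterMap
    (fun p => if PySem.Str.startswith p.2 "## " = true ∧ p.2 ≠ "## Next Steps" then some p.1 else none)

lemma pvNS_nil (k : Int) : pvNS [] k = [] := rfl
lemma pvOT_nil (k : Int) : pvOT [] k = [] := rfl

lemma pvNS_cons (s : String) (ss : List String) (k : Int) :
    pvNS (s :: ss) k = (if s = "## Next Steps" then [k] else []) ++ pvNS ss (k + 1) := by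
  by_cases h : s = "## Next Steps" <;>
    simp [pvNS, PySem.List.enumerate_cons, h]

lemma pvOT_cons (s : String) (ss : List String) (k : Int) :
    pvOT (s :: ss) k =
      (if PySem.Str.startswith s "## " = true ∧ s ≠ "## Next Steps" then [k] else []) ++ pvOT ss (k + 1) := by
  by_cases h : PySem.Str.startswith s "## " = true ∧ s ≠ "## Next Steps"
  · simp only [pvOT, PySem.List.enumerate_cons, List.filterMap_cons, if_pos h,
      List.singleton_append]
  · simp only [pvOT, PySem.List.enumerate_cons, List.filterMap_cons, if_neg h, List.nil_append]

lemma pvNS_ge (ss : List String) (k : Int) : ∀ x ∈ pvNS ss k, k ≤ x := by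
  intro x hx
  obtain ⟨p, hp, hpx⟩ := List.mem_filterMap.mp hx
  obtain ⟨j, hj, rfl⟩ := (PySem.List.mem_enumerate_iff ss k p).mp hp
  split at hpx
  · simp at hpx; omega
  · simp at hpx

lemma pvOT_ge (ss : List String) (k : Int) : ∀ x ∈ pvOT ss k, k ≤ x := by
  intro x hx
  obtain ⟨p, hp, hpx⟩ := List.mem_filterMap.mp hx
  obtain ⟨j, hj, rfl⟩ := (PySem.List.mem_enumerate_iff ss k p).mp hp
  split at hpx
  · simp at hpx; omega
  · simp at hpx

lemma pvNS_pairwise (ss : List String) (k : Int) : (pvNS ss k).Pairwise (· < ·) := by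
  refine List.pairwise_filterMap.mpr ?_
  refine (PySem.List.pairwise_lt_enumerate ss k).imp ?_
  intro p q h b hb b' hb'
  by_cases h1 : p.2 = "## Next Steps" <;> simp [h1] at hb
  by_cases h2 : q.2 = "## Next Steps" <;> simp [h2] at hb'
  omega

-- the stripped-view of A's forward loop (proof helper)
def pvLoopS : List String → Int → Bool → Int → Int → Bool × Int × Int
  | [], _, ins, st, en => (ins, st, en)
  | s :: rest, i, ins, st, en =>
    if s = "## Next Steps" then pvLoopS rest (i + 1) true i en
    else if ins && PySem.Str.startswith s "## " then (ins, st, i)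
    else pvLoopS rest (i + 1) ins st en

lemma pvLoopA_eq_loopS (lines : List String) :
    ∀ i ins st en, pvLoopA lines i ins st en = pvLoopS (lines.map PySem.Str.strip) i ins st en := by
  induction lines with
  | nil => intro i ins st en; rfl
  | cons l rest ih =>
    intro i ins st en
    simp only [pvLoopA, pvLoopS, List.map_cons]
    split
    · exact ih _ _ _ _
    · split
      · rfl
      · exact ih _ _ _ _

-- A's loop once in the Next Steps section: start = last "## Next Steps" index before the
-- first other header (default st), end = that header's index (or -1)
lemma pvLoopS_in (ss : List String) : ∀ (k st : Int),
    pvLoopS ss k true st (-1) =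
      match pvOT ss k with
      | e :: _ => (true, ((pvNS ss k).filter (fun i => i < e)).getLastD st, e)
      | [] => (true, (pvNS ss k).getLastD st, -1) := by
  induction ss with
  | nil => intro k st; simp [pvLoopS, pvNS_nil, pvOT_nil]
  | cons s rest ih =>
    intro k st
    by_cases hns : s = "## Next Steps"
    · have hot : ¬ (PySem.Str.startswith s "## " = true ∧ s ≠ "## Next Steps") := by
        intro h; exact h.2 hns
      simp only [pvLoopS, pvNS_cons, pvOT_cons, if_pos hns, if_neg hot,
        List.nil_append, List.singleton_append]
      rw [ih (k + 1) k]
      cases hOT : pvOT rest (k + 1) with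
      | nil => simp only [List.getLastD_cons]
      | cons e es =>
        have hke : k < e := by
          have := pvOT_ge rest (k + 1) e (by rw [hOT]; exact List.mem_cons_self)
          omega
        have hfc : (k :: pvNS rest (k + 1)).filter (fun i => i < e) =
            k :: (pvNS rest (k + 1)).filter (fun i => i < e) := by
          simp [hke]
        simp only [hfc, List.getLastD_cons]
    · simp only [pvLoopS, pvNS_cons, pvOT_cons, if_neg hns, List.nil_append]
      by_cases hot : PySem.Str.startswith s "## " = true ∧ s ≠ "## Next Steps"
      · have hfil : (pvNS rest (k + 1)).filter (fun i => i < k) = [] := by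
          apply List.filter_eq_nil_iff.mpr
          intro a ha
          have := pvNS_ge rest (k + 1) a ha
          simp; omega
        rw [if_pos hot]
        simp only [List.singleton_append]
        rw [if_pos (show (true && PySem.Str.startswith s "## ") = true by simpa using hot.1)]
        simp only [hfil, List.getLastD_nil]
      · have hsw : ¬ ((true && PySem.Str.startswith s "## ") = true) := by
          intro h; exact hot ⟨by simpa using h, hns⟩
        simp only [if_neg hot, List.nil_append, if_neg hsw]
        exact ih (k + 1) st

-- A's loop from the initial state
lemma pvLoopS_pre (ss : List String) : ∀ (k : Int),
    pvLoopS ss k false (-1) (-1) =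
      match pvNS ss k with
      | [] => (false, -1, -1)
      | f :: _ =>
        match (pvOT ss k).filter (fun i => f < i) with
        | e :: _ => (true, ((pvNS ss k).filter (fun i => i < e)).getLastD (-1), e)
        | [] => (true, (pvNS ss k).getLastD (-1), -1) := by
  induction ss with
  | nil => intro k; simp [pvLoopS, pvNS_nil]
  | cons s rest ih =>
    intro k
    by_cases hns : s = "## Next Steps"
    · have hot : ¬ (PySem.Str.startswith s "## " = true ∧ s ≠ "## Next Steps") := by
        intro h; exact h.2 hns
      simp only [pvLoopS, pvNS_cons, pvOT_cons, if_pos hns, if_neg hot,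
        List.nil_append, List.singleton_append]
      rw [pvLoopS_in rest (k + 1) k]
      have hfilOT : (pvOT rest (k + 1)).filter (fun i => k < i) = pvOT rest (k + 1) := by
        apply List.filter_eq_self.mpr
        intro a ha
        have := pvOT_ge rest (k + 1) a ha
        simp; omega
      rw [hfilOT]
      cases hOT : pvOT rest (k + 1) with
      | nil => simp only [List.getLastD_cons]
      | cons e es =>
        have hke : k < e := by
          have := pvOT_ge rest (k + 1) e (by rw [hOT]; exact List.mem_cons_self)
          omega
        have hfc : (k :: pvNS rest (k + 1)).filter (fun i => i < e) =
            k :: (pvNS rest (k + 1)).filter (fun i => i < e) := by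
          simp [hke]
        simp only [hfc, List.getLastD_cons]
    · simp only [pvLoopS, pvNS_cons, pvOT_cons, if_neg hns, List.nil_append,
        Bool.false_and, Bool.false_eq_true, if_false]
      rw [ih (k + 1)]
      by_cases hot : PySem.Str.startswith s "## " = true ∧ s ≠ "## Next Steps"
      · simp only [if_pos hot, List.singleton_append]
        cases hNS : pvNS rest (k + 1) with
        | nil => rfl
        | cons f fs =>
          have hkf : k < f := by
            have := pvNS_ge rest (k + 1) f (by rw [hNS]; exact List.mem_cons_self)
            omega
          have hfc : (k :: (pvOT rest (k + 1))).filter (fun i => f < i) =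
              (pvOT rest (k + 1)).filter (fun i => f < i) := by
            simp [show ¬ f < k by omega]
          simp only [hfc]
      · simp only [if_neg hot, List.nil_append]

-- max of a strictly increasing nonempty list of Ints is its last element
lemma pvFoldlMax_chain : ∀ (t : List Int) (x : Int), (x :: t).Pairwise (· < ·) →
    t.foldl max x = t.getLastD x := by
  intro t
  induction t with
  | nil => intro x _; rfl
  | cons y ys ih =>
    intro x h
    have hxy : x < y := (List.pairwise_cons.mp h).1 y List.mem_cons_self
    have h' : (y :: ys).Pairwise (· < ·) := (List.pairwise_cons.mp h).2
    simp only [List.foldl_cons, List.getLastD_cons]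
    rw [max_eq_right (le_of_lt hxy)]
    exact ih y h'

-- max of a strictly increasing nonempty list of Ints is its last element
lemma pvMax_increasing (l : List Int) (h : l.Pairwise (· < ·)) (hne : l ≠ []) :
    PySem.List.max? l (fun i => i) = some (l.getLastD (-1)) := by
  cases l with
  | nil => exact absurd rfl hne
  | cons x t =>
    rw [PySem.List.max?_id_cons, List.getLastD_cons]
    exact congrArg some (pvFoldlMax_chain t x h)

-- B's "others" comprehension = the other-header indices after f
lemma pvOthers_eq (ss : List String) (f : Int) :
    (PySem.List.enumerate ss 0).filterMap
        (fun p => if f < p.1 ∧ PySem.Str.startswith p.2 "## " = true ∧ p.2 ≠ "## Next Steps"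
                  then some p.1 else none)
      = (pvOT ss 0).filter (fun i => f < i) := by
  unfold pvOT
  generalize PySem.List.enumerate ss 0 = l
  induction l with
  | nil => rfl
  | cons p rest ih =>
    simp only [List.filterMap_cons]
    by_cases h2 : PySem.Str.startswith p.2 "## " = true ∧ p.2 ≠ "## Next Steps"
    · by_cases h1 : f < p.1
      · rw [if_pos ⟨h1, h2⟩, if_pos h2, ih]
        simp [h1]
      · rw [if_neg (fun h => h1 h.1), if_pos h2, ih]
        simp [h1]
    · rw [if_neg (fun h => h2 h.2), if_neg h2, ih]

-- the two backward scans agree: A strips lines[i] afresh, B indexes the pre-stripped list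
lemma pvBack_eq (lines : List String) (r : List Int) :
    pvBackA lines r =
      (r.find? (fun i => decide (PySem.List.pyGetD (lines.map PySem.Str.strip) i "" ≠ "" ∧
          PySem.List.pyGetD (lines.map PySem.Str.strip) i "" ≠ "---"))).elim (-1) (fun i => i + 1) := by
  induction r with
  | nil => rfl
  | cons i rest ih =>
    have hmap : PySem.List.pyGetD (lines.map PySem.Str.strip) i "" =
        PySem.Str.strip (PySem.List.pyGetD lines i "") := by
      have h := PySem.List.pyGetD_map PySem.Str.strip lines i ""
      rw [show PySem.Str.strip "" = "" from by decide] at h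
      exact h
    simp only [pvBackA, List.find?_cons, hmap]
    by_cases h : PySem.Str.strip (PySem.List.pyGetD lines i "") ≠ "" ∧
        PySem.Str.strip (PySem.List.pyGetD lines i "") ≠ "---"
    · simp [h]
    · simp [h, ih]

-- main equality
lemma pvMain (lines : List String) : find_next_steps_end lines = find_next_steps_end_alt lines := by
  have hns_def : (PySem.List.enumerate (lines.map PySem.Str.strip) 0).filterMap
      (fun p => if p.2 = "## Next Steps" then some p.1 else none)
        = pvNS (lines.map PySem.Str.strip) 0 := rfl
  simp only [find_next_steps_end, find_next_steps_end_alt]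
  rw [pvLoopA_eq_loopS, pvLoopS_pre, hns_def]
  cases hNS : pvNS (lines.map PySem.Str.strip) 0 with
  | nil => simp
  | cons f fs =>
    simp only [hNS]
    rw [pvOthers_eq (lines.map PySem.Str.strip) f]
    have hpw : (f :: fs).Pairwise (· < ·) := hNS ▸ pvNS_pairwise (lines.map PySem.Str.strip) 0
    cases hOT : (pvOT (lines.map PySem.Str.strip) 0).filter (fun i => f < i) with
    | nil =>
      simp only [hOT]
      have hlast : PySem.List.pyGetD (f :: fs) (-1) (-1) = (f :: fs).getLastD (-1) := by
        rw [PySem.List.pyGetD_neg_one (f :: fs) (-1) (by simp), List.getLast_eq_getLastD,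
          List.getLastD_cons]
      rw [hlast, pvBack_eq]
      simp
    | cons e es =>
      simp only [hOT]
      have he0 : (0 : Int) ≤ e := by
        have hmem : e ∈ pvOT (lines.map PySem.Str.strip) 0 := by
          have : e ∈ (pvOT (lines.map PySem.Str.strip) 0).filter (fun i => f < i) := by
            rw [hOT]; exact List.mem_cons_self
          exact List.mem_of_mem_filter this
        exact pvOT_ge _ _ e hmem
      have hmax : (PySem.List.max? ((f :: fs).filter (fun i => i < e)) (fun i => i)).getD (-1)
          = ((f :: fs).filter (fun i => i < e)).getLastD (-1) := by
        by_cases hnil : (f :: fs).filter (fun i => i < e) = []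
        · rw [hnil]; rfl
        · rw [pvMax_increasing _ (hpw.filter _) hnil]; rfl
      split_ifs with hcond
      · exact absurd hcond.2 (by omega)
      · rw [hmax]

-- ===== VERDICT (by name: the statement is the Claim_ definition above) =====
theorem find_next_steps_end_spec : Claim_equal_find_next_steps_end := by
  intro lines _
  unfold Spec_find_next_steps_end
  exact pvMain lines
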